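-- pv_equiv track=rewrite | github.com/BertilBraun/Programming-Puzzles | AdventOfCode/2023/03.2.py | all_numbers
-- ===== SOURCE A (Python) =====
-- def all_numbers(grid: list[list[str]]) -> list[tuple[int, int, int, int]]:
--     numbers: list[tuple[int, int, int, int]] = []
--     for y in range(len(grid)):
--         current = ''
--         start: int | None = None
--         for x in range(len(grid[y])):
--             if grid[y][x].isdigit():
--                 current += grid[y][x]
--                 if start is None:
--                     start = x
--             else:
--                 if current:
--                     end = x
--                     numbers.append((int(current), y, start, end))  # type: ignore
--                 current = ''
--                 start = None
--         if current:
--             end = len(grid[y])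
--             numbers.append((int(current), y, start, end))  # type: ignore
--     return numbers
-- ===== SOURCE B (Python) =====
-- def all_numbers(grid: list[list[str]]) -> list[tuple[int, int, int, int]]:
--     numbers: list[tuple[int, int, int, int]] = []
--     for y, row in enumerate(grid):
--         n = len(row)
--         x = 0
--         while x < n:
--             if row[x].isdigit():
--                 start = x
--                 while x < n and row[x].isdigit():
--                     x += 1
--                 numbers.append((int(''.join(row[start:x])), y, start, x))
--             else:
--                 x += 1
--     return numbers
-- ===== Notes on version B (the rewrite author's own statement) =====
-- stated objective: simpler
-- what changed: Replaced A's per-cell accumulation state machine (current string, Optional start, end-of-row flush) by a run-scanner that finds each maximal run of digit cells and emits one tuple per run via a slice-and-join, eliminating the carried state and the flush.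
import Mathlib
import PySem

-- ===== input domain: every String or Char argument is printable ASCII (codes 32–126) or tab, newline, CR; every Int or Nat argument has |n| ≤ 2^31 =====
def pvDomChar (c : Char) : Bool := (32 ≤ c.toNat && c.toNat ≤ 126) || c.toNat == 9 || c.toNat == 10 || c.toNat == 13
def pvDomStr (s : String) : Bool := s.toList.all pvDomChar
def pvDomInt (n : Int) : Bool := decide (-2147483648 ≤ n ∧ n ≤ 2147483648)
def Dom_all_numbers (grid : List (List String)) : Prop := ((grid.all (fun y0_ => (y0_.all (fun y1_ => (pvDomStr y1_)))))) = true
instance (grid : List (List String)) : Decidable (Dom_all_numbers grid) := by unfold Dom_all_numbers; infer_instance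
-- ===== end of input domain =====

-- B replaces A's per-cell accumulation state machine (current/start/end-of-row flush) by a
-- run-scanner: find each maximal run of digit cells, emit one tuple per run (objective: simpler).

-- ===== PORT A =====
-- Inner loop over the row's cells, carrying x, current (Python's accumulated string, kept as its
-- list of chars: 'current += grid[y][x]' is 'current ++ c.toList') and start : Option Int.
-- The [] case is the end-of-row flush.  'int(current)' is ported as (ofChars? current).getD 0 and
-- 'start' as start.getD 0: exact, since whenever A appends, current is a nonempty all-digit string
-- (so int() succeeds) and start was set (is some).
def pvA_row (y : Int) (x : Int) (current : List Char) (start : Option Int) (row : List String) :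
    List (Int × Int × Int × Int) :=
  match row with
  | [] =>
      if current ≠ [] then [((PySem.Int.ofChars? current).getD 0, y, start.getD 0, x)] else []
  | c :: rest =>
      if PySem.Str.strIsdigit c then
        pvA_row y (x + 1) (current ++ c.toList) (if start.isNone then some x else start) rest
      else
        (if current ≠ [] then [((PySem.Int.ofChars? current).getD 0, y, start.getD 0, x)] else [])
          ++ pvA_row y (x + 1) [] none rest

-- outer loop: for y in range(len(grid))
def pvA_rows (y : Int) (rows : List (List String)) : List (Int × Int × Int × Int) :=
  match rows with
  | [] => []
  | r :: rs => pvA_row y 0 [] none r ++ pvA_rows (y + 1) rs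

def all_numbers (grid : List (List String)) : List (Int × Int × Int × Int) :=
  pvA_rows 0 grid

-- ===== PORT B =====
-- B's outer while: at a digit cell, the inner while advances x over the maximal run of digit
-- cells (= takeWhile); ''.join(row[start:x]) is the concatenation of that run's characters
-- ((run.map String.toList).flatten), and int(...) is (ofChars? ...).getD 0 (exact: the run is
-- nonempty and all-digit).  At a non-digit cell, x += 1.
def pvB_row (y : Int) (x : Int) (row : List String) : List (Int × Int × Int × Int) :=
  match row with
  | [] => []
  | c :: rest =>
      if h : PySem.Str.strIsdigit c then
        let run := (c :: rest).takeWhile (fun s => PySem.Str.strIsdigit s)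
        ((PySem.Int.ofChars? ((run.map String.toList).flatten)).getD 0, y, x, x + (run.length : Int))
          :: pvB_row y (x + (run.length : Int)) ((c :: rest).drop run.length)
      else
        pvB_row y (x + 1) rest
termination_by row.length
decreasing_by
  · simp only [List.takeWhile_cons, h, if_pos, List.length_drop, List.length_cons]
    omega
  · simp

-- outer loop: for y, row in enumerate(grid)
def pvB_rows (y : Int) (rows : List (List String)) : List (Int × Int × Int × Int) :=
  match rows with
  | [] => []
  | r :: rs => pvB_row y 0 r ++ pvB_rows (y + 1) rs

def all_numbers_alt (grid : List (List String)) : List (Int × Int × Int × Int) :=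
  pvB_rows 0 grid

-- ===== PRECONDITION & SPEC =====
def Spec_all_numbers (grid : List (List String)) (out : List (Int × Int × Int × Int)) : Prop := out = all_numbers_alt grid
instance (grid : List (List String)) (out : List (Int × Int × Int × Int)) : Decidable (Spec_all_numbers grid out) := by unfold Spec_all_numbers; infer_instance

-- ===== CLAIM (what is proved, stated in full; the proofs are below) =====
def Claim_equal_all_numbers : Prop := ∀ (grid : List (List String)), Dom_all_numbers grid → Spec_all_numbers grid (all_numbers grid)

-- ===== LEMMAS AND PROOFS =====

-- While A's current is nonempty (so start = some s), processing the rest of the row first emits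
-- one tuple for the pending run (extended by the maximal digit prefix of the rest) and then
-- continues in the reset state past that prefix.
theorem pvA_row_run (row : List String) : ∀ (y x s : Int) (cur : List Char), cur ≠ [] →
    pvA_row y x cur (some s) row =
      ((PySem.Int.ofChars? (cur ++ (((row.takeWhile (fun t => PySem.Str.strIsdigit t)).map String.toList).flatten))).getD 0,
        y, s, x + ((row.takeWhile (fun t => PySem.Str.strIsdigit t)).length : Int))
        :: pvA_row y (x + ((row.takeWhile (fun t => PySem.Str.strIsdigit t)).length : Int)) [] none
            (row.drop (row.takeWhile (fun t => PySem.Str.strIsdigit t)).length) := by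
  induction row with
  | nil => intro y x s cur hcur; simp [pvA_row, hcur]
  | cons c rest ih =>
    intro y x s cur hcur
    by_cases h : PySem.Str.strIsdigit c
    · have hne : cur ++ c.toList ≠ [] := by simp [hcur]
      simp only [pvA_row, h, if_pos, Option.isNone_some, Bool.false_eq_true, if_false]
      rw [ih y (x + 1) s (cur ++ c.toList) hne]
      simp only [List.takeWhile_cons, h, if_pos, List.map_cons, List.flatten_cons,
        List.length_cons, List.drop_succ_cons, List.append_assoc]
      have harith : x + 1 + ((List.takeWhile (fun t => PySem.Str.strIsdigit t) rest).length : Int)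
          = x + (((List.takeWhile (fun t => PySem.Str.strIsdigit t) rest).length + 1 : Nat) : Int) := by
        push_cast; ring
      rw [harith]
    · have h2 : ¬ PySem.Chars.strIsdigit c.toList = true := by simpa using h
      simp [pvA_row, hcur, h2]

-- In the reset state, A's state machine is B's run-scanner.
theorem pvA_row_eq_pvB_row (n : Nat) : ∀ (row : List String), row.length ≤ n → ∀ (y x : Int),
    pvA_row y x [] none row = pvB_row y x row := by
  induction n with
  | zero =>
    intro row hlen y x
    have : row = [] := List.eq_nil_of_length_eq_zero (Nat.le_zero.mp hlen)
    subst this; simp [pvA_row, pvB_row]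
  | succ n ih =>
    intro row hlen y x
    match row with
    | [] => simp [pvA_row, pvB_row]
    | c :: rest =>
      by_cases h : PySem.Str.strIsdigit c
      · have hcne : c.toList ≠ [] := by
          intro hnil
          have hb := PySem.Str.strIsdigit_eq c
          rw [hnil] at hb
          rw [hb] at h
          exact absurd h (by decide)
        simp only [pvA_row, h, if_pos, Option.isNone_none, List.nil_append]
        rw [pvA_row_run rest y (x + 1) x c.toList hcne]
        rw [pvB_row]
        simp only [h, dif_pos, List.takeWhile_cons, if_pos, List.map_cons, List.flatten_cons,
          List.length_cons, List.drop_succ_cons]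
        have harith : x + 1 + ((List.takeWhile (fun t => PySem.Str.strIsdigit t) rest).length : Int)
            = x + (((List.takeWhile (fun t => PySem.Str.strIsdigit t) rest).length + 1 : Nat) : Int) := by
          push_cast; ring
        rw [harith, ih (rest.drop (rest.takeWhile (fun t => PySem.Str.strIsdigit t)).length)
          (by simp only [List.length_drop]; simp at hlen; omega) y]
      · have hA : pvA_row y x [] none (c :: rest) = pvA_row y (x + 1) [] none rest := by
          simp only [pvA_row, h, Bool.false_eq_true, if_false]; simp
        have h2 : ¬ PySem.Chars.strIsdigit c.toList = true := by simpa using h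
        have hB : pvB_row y x (c :: rest) = pvB_row y (x + 1) rest := by
          rw [pvB_row]; simp [h2]
        rw [hA, hB]
        exact ih rest (by simp at hlen; omega) y (x + 1)

theorem pvA_rows_eq (rows : List (List String)) : ∀ (y : Int), pvA_rows y rows = pvB_rows y rows := by
  induction rows with
  | nil => intro y; rfl
  | cons r rs ih =>
    intro y
    simp only [pvA_rows, pvB_rows, ih]
    rw [pvA_row_eq_pvB_row r.length r (le_refl _)]

-- ===== VERDICT (by name: the statement is the Claim_ definition above) =====
theorem all_numbers_spec : Claim_equal_all_numbers := by
  intro grid _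
  show all_numbers grid = all_numbers_alt grid
  exact pvA_rows_eq grid 0
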